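-- pv_equiv track=rewrite | github.com/vuhiep98/QAD-FC | models/qa_generate.py | post_process
-- ===== SOURCE A (Python) =====
-- def post_process(response):
--     lines = response.split("\n")
--     lines = list(
--         filter(lambda line: line.startswith("Q: ") or line.startswith("A: "), lines)
--     )
--     lines = [line[3:] for line in lines]
--     pairs = [lines[i : i + 2] for i in range(0, len(lines), 2)]
--     pairs = list(filter(lambda pair: len(pair) == 2, pairs))
--     return pairs
-- ===== SOURCE B (Python) =====
-- def post_process(response):
--     pairs = []
--     buf = []
--     for line in response.split("\n"):
--         if line.startswith("Q: ") or line.startswith("A: "):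
--             buf.append(line[3:])
--             if len(buf) == 2:
--                 pairs.append(buf)
--                 buf = []
--     return pairs
-- ===== Notes on version B (the rewrite author's own statement) =====
-- stated objective: alternative
-- what changed: Replaced A's four-stage pipeline (filter, map, index-based chunking via range/slicing, filter on chunk length) by a single pass over the raw lines that maintains a two-element buffer and emits a pair whenever it fills, dropping any leftover element.
import Mathlib
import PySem

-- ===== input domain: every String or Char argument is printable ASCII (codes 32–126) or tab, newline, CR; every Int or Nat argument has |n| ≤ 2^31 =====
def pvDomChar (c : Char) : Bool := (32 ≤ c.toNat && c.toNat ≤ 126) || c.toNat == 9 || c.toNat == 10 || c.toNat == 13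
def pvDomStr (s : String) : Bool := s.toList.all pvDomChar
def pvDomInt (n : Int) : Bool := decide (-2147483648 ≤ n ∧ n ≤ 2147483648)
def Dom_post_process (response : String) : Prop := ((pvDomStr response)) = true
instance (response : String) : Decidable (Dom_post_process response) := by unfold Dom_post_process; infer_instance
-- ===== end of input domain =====

-- B replaces A's filter/map/index-chunking pipeline by one pass with a two-slot buffer (alternative decomposition, same cost).

-- ===== PORT A =====
def post_process (response : String) : List (List String) :=
  let lines := (PySem.Str.split? response "\n").getD []
  let lines := lines.filter (fun line => PySem.Str.startswith line "Q: " || PySem.Str.startswith line "A: ")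
  let lines := lines.map (fun line => PySem.Str.slice line (some 3) none)
  let pairs := (PySem.List.pyRange 0 (PySem.List.len lines) 2).map
      (fun i => PySem.List.slice lines (some i) (some (i + 2)))
  pairs.filter (fun pair => PySem.List.len pair == 2)

-- ===== PORT B =====
def pp_step (st : List (List String) × List String) (line : String) :
    List (List String) × List String :=
  if PySem.Str.startswith line "Q: " || PySem.Str.startswith line "A: " then
    let buf := st.2 ++ [PySem.Str.slice line (some 3) none]
    if PySem.List.len buf == 2 then (st.1 ++ [buf], []) else (st.1, buf)
  else st

def post_process_alt (response : String) : List (List String) :=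
  ((((PySem.Str.split? response "\n").getD []).foldl pp_step ([], [])).1)

-- ===== PRECONDITION & SPEC =====
def Spec_post_process (response : String) (out : List (List String)) : Prop := out = post_process_alt response
instance (response : String) (out : List (List String)) : Decidable (Spec_post_process response out) := by unfold Spec_post_process; infer_instance

-- ===== CLAIM (what is proved, stated in full; the proofs are below) =====
def Claim_equal_post_process : Prop := ∀ (response : String), Dom_post_process response → Spec_post_process response (post_process response)

-- ===== LEMMAS AND PROOFS =====

/-- Reference chunking: consecutive pairs, leftover dropped. -/
def chunk2 : List String → List (List String)
  | a :: b :: t => [a, b] :: chunk2 t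
  | _ => []

theorem chunk2_short (l : List String) (h : l.length ≤ 1) : chunk2 l = [] := by
  match l, h with
  | [], _ => rfl
  | [_], _ => rfl

theorem pyRange_two (n : ℕ) :
    PySem.List.pyRange 0 (n : Int) 2 =
      (List.range ((n + 1) / 2)).map (fun k => ((2 * k : ℕ) : Int)) := by
  rw [PySem.List.pyRange_of_pos 0 (n : Int) (by norm_num)]
  have hc : (if (0 : Int) < (n : Int) then (((n : Int) - 0 + 2 - 1) / 2).toNat else 0)
      = (n + 1) / 2 := by split_ifs with h <;> omega
  rw [hc]
  refine List.map_congr_left (fun k _ => ?_)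
  push_cast; ring

theorem chunkFilter : ∀ (ls : List String),
    ((List.range ((ls.length + 1) / 2)).map (fun k => (ls.drop (2 * k)).take 2)).filter
        (fun p => PySem.List.len p == 2) = chunk2 ls
  | [] => by simp [chunk2]
  | [x] => by simp [chunk2, PySem.List.len]
  | a :: b :: t => by
    have hlen : ((a :: b :: t).length + 1) / 2 = (t.length + 1) / 2 + 1 := by
      simp; omega
    rw [hlen, List.range_succ_eq_map]
    simp only [List.map_cons, List.map_map, List.filter_cons]
    have h0 : (((a :: b :: t).drop (2 * 0)).take 2) = [a, b] := by simp
    rw [h0]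
    have hfn : ((fun k => ((a :: b :: t).drop (2 * k)).take 2) ∘ Nat.succ)
        = fun k => (t.drop (2 * k)).take 2 := by
      funext k
      simp [Function.comp, Nat.mul_succ]
    rw [hfn, chunkFilter t]
    simp [PySem.List.len, chunk2]

theorem loop_eq : ∀ (raw : List String) (pairs : List (List String)) (buf : List String),
    buf.length ≤ 1 →
    (raw.foldl pp_step (pairs, buf)).1 =
      pairs ++ chunk2 (buf ++
        (raw.filter (fun line => PySem.Str.startswith line "Q: " || PySem.Str.startswith line "A: ")).map
          (fun line => PySem.Str.slice line (some 3) none))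
  | [], pairs, buf, h => by simp [chunk2_short buf h]
  | l :: t, pairs, buf, h => by
    by_cases hp : (PySem.Str.startswith l "Q: " || PySem.Str.startswith l "A: ") = true
    · match buf, h with
      | [], _ =>
        have hstep : pp_step (pairs, ([] : List String)) l
            = (pairs, [PySem.Str.slice l (some 3) none]) := by
          simp only [pp_step, hp, if_true]
          simp [PySem.List.len]
        simp only [List.foldl_cons]
        rw [hstep, List.filter_cons, if_pos hp, List.map_cons]
        simpa using loop_eq t pairs [PySem.Str.slice l (some 3) none] (by simp)
      | [x], _ =>
        have hstep : pp_step (pairs, [x]) l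
            = (pairs ++ [[x, PySem.Str.slice l (some 3) none]], []) := by
          simp only [pp_step, hp, if_true]
          simp [PySem.List.len]
        simp only [List.foldl_cons]
        rw [hstep, List.filter_cons, if_pos hp, List.map_cons]
        rw [loop_eq t (pairs ++ [[x, PySem.Str.slice l (some 3) none]]) [] (by simp)]
        simp [chunk2]
    · have hstep : pp_step (pairs, buf) l = (pairs, buf) := by
        rw [Bool.not_eq_true] at hp
        simp only [pp_step, hp, Bool.false_eq_true, if_false]
      simp only [List.foldl_cons]
      rw [hstep, List.filter_cons, if_neg hp]
      exact loop_eq t pairs buf h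

-- ===== VERDICT (by name: the statement is the Claim_ definition above) =====
theorem post_process_spec : Claim_equal_post_process := by
  intro response _
  unfold Spec_post_process post_process post_process_alt
  set ls := (((PySem.Str.split? response "\n").getD []).filter
      (fun line => PySem.Str.startswith line "Q: " || PySem.Str.startswith line "A: ")).map
      (fun line => PySem.Str.slice line (some 3) none) with hls
  rw [loop_eq _ [] [] (by simp)]
  simp only [List.nil_append]
  rw [← chunkFilter ls]
  have hlen : PySem.List.len ls = (ls.length : Int) := by simp [PySem.List.len]
  rw [hlen, pyRange_two ls.length, List.map_map]
  congr 1
  refine List.map_congr_left (fun k _ => ?_)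
  have := PySem.List.slice_natCast_add ls (2 * k) 2
  simp only [Function.comp]
  rw [show ((2 * k : ℕ) : Int) + 2 = ((2 * k : ℕ) : Int) + ((2 : ℕ) : Int) by norm_num]
  rw [this]
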